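-- pv_equiv track=rewrite | github.com/Tirrran/BookVerse | server.py | count_marker_hits
-- ===== SOURCE A (Python) =====
-- def count_marker_hits(terms: list[str], markers: tuple[str, ...]) -> int:
--     hits = 0
--     for term in terms:
--         for marker in markers:
--             if len(marker) <= 3:
--                 if term == marker:
--                     hits += 1
--                     break
--             elif term.startswith(marker):
--                 hits += 1
--                 break
--     return hits
-- ===== SOURCE B (Python) =====
-- def count_marker_hits(terms, markers):
--     exact = {m for m in markers if len(m) <= 3}
--     longs = {m for m in markers if len(m) > 3}
--     lens = {len(m) for m in longs}
--     hits = 0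
--     for term in terms:
--         if term in exact or any(term[:n] in longs for n in lens):
--             hits += 1
--     return hits
-- ===== Notes on version B (the rewrite author's own statement) =====
-- stated objective: faster
-- what changed: Replaces the per-term scan over all markers by precomputed hash sets: short markers (len<=3) become one set-membership test and long markers are probed by slicing the term at each distinct long-marker length and looking that prefix up in a set.
import Mathlib
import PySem

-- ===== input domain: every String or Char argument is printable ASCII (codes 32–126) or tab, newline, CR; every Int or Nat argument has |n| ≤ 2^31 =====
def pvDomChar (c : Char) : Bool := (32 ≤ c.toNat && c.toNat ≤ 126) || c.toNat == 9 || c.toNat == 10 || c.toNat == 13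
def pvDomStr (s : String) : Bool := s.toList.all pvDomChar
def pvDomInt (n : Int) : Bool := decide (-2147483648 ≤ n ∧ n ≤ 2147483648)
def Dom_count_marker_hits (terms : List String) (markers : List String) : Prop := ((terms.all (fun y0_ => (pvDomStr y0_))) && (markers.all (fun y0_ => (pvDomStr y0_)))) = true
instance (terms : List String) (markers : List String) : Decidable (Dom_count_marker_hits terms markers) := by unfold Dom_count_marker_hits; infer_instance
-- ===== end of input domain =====

-- B replaces A's per-term scan over all markers by precomputed sets (exact markers,
-- long markers, their lengths), probing each term by slice-and-lookup; objective: faster.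

-- ===== PORT A =====
-- A's inner 'for marker in markers' loop with its break
def cmhLoopA (term : String) (hits : Int) : List String → Int
  | [] => hits
  | marker :: rest =>
    if PySem.Str.len marker ≤ 3 then
      if term == marker then hits + 1 else cmhLoopA term hits rest
    else if PySem.Str.startswith term marker then hits + 1
    else cmhLoopA term hits rest

def count_marker_hits (terms : List String) (markers : List String) : Int :=
  terms.foldl (fun hits term => cmhLoopA term hits markers) 0

-- ===== PORT B =====
def count_marker_hits_alt (terms : List String) (markers : List String) : Int :=
  let exact : PySem.Set String := PySem.Set.ofList (markers.filter (fun m => PySem.Str.len m ≤ 3))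
  let longs : PySem.Set String := PySem.Set.ofList (markers.filter (fun m => 3 < PySem.Str.len m))
  let lens : PySem.Set Int := PySem.Set.ofList (longs.map PySem.Str.len)
  terms.foldl (fun hits term =>
    if exact.contains term || lens.any (fun n => longs.contains (PySem.Str.slice term none (some n)))
    then hits + 1 else hits) 0

-- ===== PRECONDITION & SPEC =====
def Spec_count_marker_hits (terms : List String) (markers : List String) (out : Int) : Prop := out = count_marker_hits_alt terms markers
instance (terms : List String) (markers : List String) (out : Int) : Decidable (Spec_count_marker_hits terms markers out) := by unfold Spec_count_marker_hits; infer_instance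

-- ===== CLAIM (what is proved, stated in full; the proofs are below) =====
def Claim_equal_count_marker_hits : Prop := ∀ (terms : List String) (markers : List String), Dom_count_marker_hits terms markers → Spec_count_marker_hits terms markers (count_marker_hits terms markers)

-- ===== LEMMAS AND PROOFS =====

-- a term is a hit iff some marker matches it (short: equality, long: prefix)
def cmhMatch (term m : String) : Bool :=
  if PySem.Str.len m ≤ 3 then term == m else PySem.Str.startswith term m

theorem cmhLoopA_eq (term : String) (hits : Int) (ms : List String) :
    cmhLoopA term hits ms = if ms.any (cmhMatch term) then hits + 1 else hits := by
  induction ms with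
  | nil => simp [cmhLoopA]
  | cons m rest ih =>
      simp only [cmhLoopA, List.any_cons, cmhMatch]
      split_ifs with h1 h2 h3 h4 h5 <;>
        simp_all [cmhMatch]

theorem cmhSlice_toList (term : String) (k : Nat) :
    (PySem.Str.slice term none (some (k : Int))).toList = term.toList.take k := by
  rw [PySem.Str.toList_slice, PySem.Chars.slice_eq_listSlice, PySem.List.slice_to_natCast]

theorem cmhCond_eq (markers : List String) (term : String) :
    (PySem.Set.contains (PySem.Set.ofList (markers.filter (fun m => PySem.Str.len m ≤ 3))) term
     || (PySem.Set.ofList ((PySem.Set.ofList (markers.filter (fun m => 3 < PySem.Str.len m))).map PySem.Str.len)).any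
          (fun n => PySem.Set.contains (PySem.Set.ofList (markers.filter (fun m => 3 < PySem.Str.len m)))
            (PySem.Str.slice term none (some n))))
    = markers.any (cmhMatch term) := by
  rw [Bool.eq_iff_iff]
  simp only [Bool.or_eq_true, List.any_eq_true, PySem.Set.contains, PySem.Set.mem_ofList,
    List.mem_filter, List.mem_map, List.contains_eq_mem, decide_eq_true_eq]
  constructor
  · rintro (⟨hmem, hlen⟩ | ⟨n, ⟨m, hm, rfl⟩, hsl⟩)
    · refine ⟨term, hmem, ?_⟩
      unfold cmhMatch; rw [if_pos hlen]; exact beq_self_eq_true term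
    · rcases hsl with ⟨hslmem, hsllen⟩
      refine ⟨_, hslmem, ?_⟩
      unfold cmhMatch; rw [if_neg (by omega)]
      rw [PySem.Str.startswith_eq, PySem.Chars.startswith_iff]
      rw [PySem.Str.len_eq m, cmhSlice_toList]
      exact List.take_prefix _ _
  · rintro ⟨m, hm, hmatch⟩
    unfold cmhMatch at hmatch
    by_cases hlen : PySem.Str.len m ≤ 3
    · left
      rw [if_pos hlen] at hmatch
      have : term = m := eq_of_beq hmatch
      subst this; exact ⟨hm, hlen⟩
    · right
      rw [if_neg hlen] at hmatch
      have hpre : m.toList <+: term.toList := by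
        rw [PySem.Str.startswith_eq, PySem.Chars.startswith_iff] at hmatch; exact hmatch
      have hlen' : 3 < PySem.Str.len m := by omega
      have heq : PySem.Str.slice term none (some (PySem.Str.len m)) = m := by
        apply String.toList_inj.mp
        rw [PySem.Str.len_eq, cmhSlice_toList]
        exact (List.prefix_iff_eq_take.mp hpre).symm
      refine ⟨PySem.Str.len m, ⟨m, ?_, rfl⟩, ?_⟩
      · exact ⟨hm, hlen'⟩
      · rw [heq]; exact ⟨hm, hlen'⟩

-- ===== VERDICT (by name: the statement is the Claim_ definition above) =====
theorem count_marker_hits_spec : Claim_equal_count_marker_hits := by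
  intro terms markers _
  unfold Spec_count_marker_hits count_marker_hits count_marker_hits_alt
  rw [PySem.List.foldl_congr_mem terms _ (fun hits term => if markers.any (cmhMatch term) then hits + 1 else hits) 0
      (fun acc x _ => cmhLoopA_eq x acc markers)]
  refine (PySem.List.foldl_congr_mem terms _ _ 0 ?_).symm
  intro acc x _
  rw [cmhCond_eq]
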